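-- pv_equiv track=rewrite | github.com/thumbe12856/competitive-programming | cf/_contest/731_Div3/7/solve.py | solve
-- ===== SOURCE A (Python) =====
-- from collections import defaultdict
--
-- def solve(N, G):
--     ans = [0] * N
--     can = set()
--     all_vis = defaultdict(int)
--     def dfs(node, vis):
--         if node in vis:
--             ans[node] = -1
--             can.add(node)
--             all_vis[node] = 2
--             return
--
--         if all_vis[node] >= 2:
--             return
--
--         all_vis[node] += 1
--         vis.add(node)
--         ans[node] = min(2, ans[node] + 1)
--         for next_node in G[node]:
--             dfs(next_node, vis)
--         vis.remove(node)
--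
--     dfs(0, set())
--
--     all_vis = set()
--     def dfs2(node, vis):
--         if node in vis:
--             return
--
--         if node in all_vis:
--             return
--
--         ans[node] = -1
--         vis.add(node)
--         all_vis.add(node)
--         for next_node in G[node]:
--             dfs2(next_node, vis)
--         vis.remove(node)
--
--     for node in can:
--         dfs2(node, set())
--
--     return (" ").join(map(str, ans))
-- ===== SOURCE B (Python) =====
-- def solve(N, G):
--     # Iterative version: both recursive DFS passes become explicit-stack loops.
--     # (Result is independent of the order flagged nodes are taken from the set.)
--     ans = [0] * N
--     can = set()
--     all_vis = {}
--     vis = set()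
--
--     # Pass 1: simulate the counting DFS with call/return frames.
--     stack = [(0, True)]
--     while stack:
--         node, is_call = stack.pop()
--         if not is_call:
--             vis.remove(node)
--             continue
--         if node in vis:
--             ans[node] = -1
--             can.add(node)
--             all_vis[node] = 2
--             continue
--         if all_vis.get(node, 0) >= 2:
--             continue
--         all_vis[node] = all_vis.get(node, 0) + 1
--         vis.add(node)
--         ans[node] = min(2, ans[node] + 1)
--         stack.append((node, False))
--         for next_node in reversed(G[node]):
--             stack.append((next_node, True))
--
--     # Pass 2: one worklist loop marks everything reachable from a flagged node.
--     work = list(can)[::-1]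
--     marked = set()
--     while work:
--         node = work.pop()
--         if node in marked:
--             continue
--         marked.add(node)
--         ans[node] = -1
--         work.extend(reversed(G[node]))
--
--     return (" ").join(map(str, ans))
-- ===== Notes on version B (the rewrite author's own statement) =====
-- stated objective: alternative
-- what changed: Both recursive DFS passes are replaced by iterative loops: pass 1 runs on an explicit stack of call/return frames maintaining the visiting set, and pass 2 becomes a single worklist loop over all flagged roots with one global marked set instead of per-root recursive DFS with per-path vis sets.
import Mathlib
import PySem

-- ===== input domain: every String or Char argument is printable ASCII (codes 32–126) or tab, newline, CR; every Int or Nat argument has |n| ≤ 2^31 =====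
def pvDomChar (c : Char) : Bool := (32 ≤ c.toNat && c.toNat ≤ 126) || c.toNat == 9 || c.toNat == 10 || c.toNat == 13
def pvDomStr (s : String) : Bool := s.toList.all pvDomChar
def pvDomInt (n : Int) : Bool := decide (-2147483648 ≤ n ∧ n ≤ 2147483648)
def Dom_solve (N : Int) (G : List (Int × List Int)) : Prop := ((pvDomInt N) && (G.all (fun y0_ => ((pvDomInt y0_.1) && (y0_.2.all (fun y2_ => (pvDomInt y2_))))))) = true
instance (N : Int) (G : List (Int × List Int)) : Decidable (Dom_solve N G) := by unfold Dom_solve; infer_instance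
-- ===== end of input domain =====

-- B replaces A's two recursive DFS passes by explicit-stack loops (call/return frames
-- for the counting pass, a plain worklist for the -1 marking pass); same return value.

-- ===== PORT A =====
-- state of pass 1: (ans, can, all_vis)
def dfs1 (g : PySem.Dict Int (List Int)) :
    Nat → Int → PySem.Set Int →
    (List Int × PySem.Set Int × PySem.Dict Int Int) →
    (List Int × PySem.Set Int × PySem.Dict Int Int)
  | 0, _, _, s => s     -- fuel exhaustion is unreachable (vis grows into the key set each level)
  | f+1, node, vis, (ans, can, av) =>
    if node ∈ vis then
      (PySem.List.pySetD ans node (-1), PySem.Set.add can node, av.insert node 2)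
    else if 2 ≤ av.getD node 0 then (ans, can, av)
    else
      -- Python mutates ans/vis/all_vis then loops over G[node];
      -- a missing key raises KeyError (excluded by Pre_), ported as an empty neighbour list
      ((g.getD node []).foldl (fun s m => dfs1 g f m (PySem.Set.add vis node) s)
        (PySem.List.pySetD ans node (min 2 (PySem.List.pyGetD ans node 0 + 1)), can,
         av.insert node (av.getD node 0 + 1)))

-- state of pass 2: (ans, all_vis); vis is the per-path set of dfs2
def dfs2 (g : PySem.Dict Int (List Int)) :
    Nat → Int → PySem.Set Int → (List Int × PySem.Set Int) → (List Int × PySem.Set Int)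
  | 0, _, _, s => s
  | f+1, node, vis, (ans, av) =>
    if node ∈ vis then (ans, av)
    else if node ∈ av then (ans, av)
    else
      ((g.getD node []).foldl (fun s m => dfs2 g f m (PySem.Set.add vis node) s)
        (PySem.List.pySetD ans node (-1), PySem.Set.add av node))

def solve (N : Int) (G : List (Int × List Int)) : String :=
  let g := PySem.Dict.mk G
  let fuel := G.length + 1
  let s1 := dfs1 g fuel 0 PySem.Set.empty (List.replicate N.toNat 0, PySem.Set.empty, PySem.Dict.empty)
  -- "for node in can: dfs2(node, set())" — the final ans does not depend on the set's iteration order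
  let s2 := s1.2.1.foldl (fun s c => dfs2 g fuel c PySem.Set.empty s) (s1.1, PySem.Set.empty)
  PySem.Str.join " " (s2.1.map PySem.Int.toStr)

-- ===== PORT B =====
inductive PvFrame
  | call : Int → PvFrame
  | ret  : Int → PvFrame
deriving Repr, DecidableEq

def pvWt (fs : List PvFrame) : Nat :=
  (fs.map (fun fr => match fr with | .call _ => 2 | .ret _ => 1)).sum

def pvPot1 (g : PySem.Dict Int (List Int)) (av : PySem.Dict Int Int) : Nat :=
  g.keys.toFinset.sum (fun k => (2 - min 2 (av.getD k 0)).toNat)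

def pvPot2 (g : PySem.Dict Int (List Int)) (marked : PySem.Set Int) : Nat :=
  (g.keys.toFinset \ marked.toFinset).card

lemma pvLexNat {a a' b b' : Nat} (h : a' < a ∨ (a' = a ∧ b' < b)) :
    Prod.Lex (· < ·) (· < ·) (a', b') (a, b) := by
  rcases h with h | ⟨h1, h2⟩
  · exact Prod.Lex.left _ _ h
  · subst h1; exact Prod.Lex.right _ h2

lemma pvPot1_insert_flag_le (g : PySem.Dict Int (List Int)) (av : PySem.Dict Int Int) (n : Int) :
    pvPot1 g (av.insert n 2) ≤ pvPot1 g av := by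
  unfold pvPot1
  apply Finset.sum_le_sum
  intro k _
  rw [PySem.Dict.getD_insert]
  split_ifs with h
  · simp
  · exact le_rfl

lemma pvPot1_insert_succ_lt (g : PySem.Dict Int (List Int)) (av : PySem.Dict Int Int) (n : Int)
    (hmem : n ∈ g.keys) (hlt : av.getD n 0 < 2) :
    pvPot1 g (av.insert n (av.getD n 0 + 1)) < pvPot1 g av := by
  unfold pvPot1
  apply Finset.sum_lt_sum
  · intro k _
    rw [PySem.Dict.getD_insert]
    split_ifs with h
    · subst h; simp only [min_def]; split_ifs <;> omega
    · exact le_rfl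
  · refine ⟨n, List.mem_toFinset.mpr hmem, ?_⟩
    rw [PySem.Dict.getD_insert, if_pos rfl]
    simp only [min_def]; split_ifs <;> omega

lemma pvPot1_insert_not_mem_eq (g : PySem.Dict Int (List Int)) (av : PySem.Dict Int Int)
    (n : Int) (v : Int) (h : n ∉ g.keys) :
    pvPot1 g (av.insert n v) = pvPot1 g av := by
  unfold pvPot1
  refine Finset.sum_congr rfl (fun k hk => ?_)
  rw [PySem.Dict.getD_insert, if_neg]
  intro hkn; exact h (hkn ▸ List.mem_toFinset.mp hk)

lemma pvPot2_add_lt (g : PySem.Dict Int (List Int)) (m : PySem.Set Int) (c : Int)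
    (hc : c ∈ g.keys) (hm : c ∉ m) :
    pvPot2 g (PySem.Set.add m c) < pvPot2 g m := by
  unfold pvPot2
  rw [PySem.Set.add_of_not_mem hm, List.toFinset_append]
  simp only [List.toFinset_cons, List.toFinset_nil, insert_empty_eq]
  rw [Finset.union_singleton, Finset.sdiff_insert]
  have hmem : c ∈ g.keys.toFinset \ m.toFinset :=
    Finset.mem_sdiff.mpr ⟨List.mem_toFinset.mpr hc, fun hx => hm (List.mem_toFinset.mp hx)⟩
  have := Finset.card_erase_of_mem hmem
  have hpos : 0 < (g.keys.toFinset \ m.toFinset).card := Finset.card_pos.mpr ⟨c, hmem⟩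
  omega

lemma pvPot2_add_eq (g : PySem.Dict Int (List Int)) (m : PySem.Set Int) (c : Int)
    (hc : c ∉ g.keys) :
    pvPot2 g (PySem.Set.add m c) = pvPot2 g m := by
  unfold pvPot2
  by_cases hm : c ∈ m
  · rw [PySem.Set.add_of_mem hm]
  · rw [PySem.Set.add_of_not_mem hm, List.toFinset_append]
    simp only [List.toFinset_cons, List.toFinset_nil, insert_empty_eq]
    rw [Finset.union_singleton, Finset.sdiff_insert, Finset.erase_eq_self.mpr]
    intro hx
    exact hc (List.mem_toFinset.mp (Finset.mem_sdiff.mp hx).1)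

-- pass 1 of B: the recursion of dfs1 run on an explicit stack of call/return frames
def run1 (g : PySem.Dict Int (List Int)) :
    List PvFrame → PySem.Set Int →
    (List Int × PySem.Set Int × PySem.Dict Int Int) →
    (List Int × PySem.Set Int × PySem.Dict Int Int)
  | [], _, s => s
  | .ret n :: k, vis, s => run1 g k (PySem.Set.discard vis n) s
  | .call n :: k, vis, (ans, can, av) =>
    if n ∈ vis then
      run1 g k vis (PySem.List.pySetD ans n (-1), PySem.Set.add can n, av.insert n 2)
    else if 2 ≤ av.getD n 0 then run1 g k vis (ans, can, av)
    else
      run1 g ((g.getD n []).map .call ++ .ret n :: k) (PySem.Set.add vis n)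
        (PySem.List.pySetD ans n (min 2 (PySem.List.pyGetD ans n 0 + 1)), can,
         av.insert n (av.getD n 0 + 1))
termination_by fs _ s => (pvPot1 g s.2.2, pvWt fs)
decreasing_by
  · exact pvLexNat (Or.inr ⟨rfl, by simp [pvWt]⟩)
  · rcases Nat.lt_or_ge (pvPot1 g (av.insert n 2)) (pvPot1 g av) with h | h
    · exact pvLexNat (Or.inl h)
    · exact pvLexNat (Or.inr ⟨Nat.le_antisymm (pvPot1_insert_flag_le g av n) h, by simp [pvWt]⟩)
  · exact pvLexNat (Or.inr ⟨rfl, by simp [pvWt]⟩)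
  · by_cases hk : n ∈ g.keys
    · exact pvLexNat (Or.inl (pvPot1_insert_succ_lt g av n hk (by omega)))
    · have hc : g.contains n = false := by
        by_contra hb
        exact hk ((PySem.Dict.contains_iff_mem_keys g n).mp (by simpa using hb))
      refine pvLexNat (Or.inr ⟨pvPot1_insert_not_mem_eq g av n _ hk, ?_⟩)
      rw [PySem.Dict.getD_of_not_contains g [] hc]
      simp [pvWt]

-- pass 2 of B: a single worklist loop, no per-path vis sets
def run2 (g : PySem.Dict Int (List Int)) :
    List Int → PySem.Set Int → List Int → (List Int × PySem.Set Int)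
  | [], marked, ans => (ans, marked)
  | c :: w, marked, ans =>
    if c ∈ marked then run2 g w marked ans
    else run2 g ((g.getD c []) ++ w) (PySem.Set.add marked c) (PySem.List.pySetD ans c (-1))
termination_by ws marked _ => (pvPot2 g marked, ws.length)
decreasing_by
  · exact pvLexNat (Or.inr ⟨rfl, by simp⟩)
  · by_cases hk : c ∈ g.keys
    · exact pvLexNat (Or.inl (pvPot2_add_lt g marked c hk (by assumption)))
    · have hc : g.contains c = false := by
        by_contra hb
        exact hk ((PySem.Dict.contains_iff_mem_keys g c).mp (by simpa using hb))
      refine pvLexNat (Or.inr ⟨pvPot2_add_eq g marked c hk, ?_⟩)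
      rw [PySem.Dict.getD_of_not_contains g [] hc]
      simp

def solve_alt (N : Int) (G : List (Int × List Int)) : String :=
  let g := PySem.Dict.mk G
  let s1 := run1 g [PvFrame.call 0] PySem.Set.empty
    (List.replicate N.toNat 0, PySem.Set.empty, PySem.Dict.empty)
  let s2 := run2 g s1.2.1 PySem.Set.empty s1.1
  PySem.Str.join " " (s2.1.map PySem.Int.toStr)

-- ===== PRECONDITION & SPEC =====
-- pvReach G: the nodes reachable from node 0 in the input graph (closure of {0} under the
-- neighbour lists; |G|+1 closure rounds suffice since each round short of the fixpoint adds
-- a node and there are at most |G| keys). A property of the input, not of either program.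
def pvReachStep (G : List (Int × List Int)) (S : List Int) : List Int :=
  PySem.Set.update S (S.flatMap (fun n => (PySem.Dict.mk G).getD n []))
def pvReach (G : List (Int × List Int)) : List Int :=
  (pvReachStep G)^[G.length + 1] [0]

-- Pre_ excludes exactly the inputs on which A raises: N ≤ 0 (ans[0] fails), or some node
-- reachable from 0 without a key in G (KeyError) or with an index outside [-N, N) (IndexError).
def Pre_solve (N : Int) (G : List (Int × List Int)) : Prop :=
  0 < N ∧ ∀ n ∈ pvReach G, (-N ≤ n ∧ n < N ∧ n ∈ G.map Prod.fst)
instance (N : Int) (G : List (Int × List Int)) : Decidable (Pre_solve N G) := by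
  unfold Pre_solve; infer_instance

def pvWitness_solve : Int × (List (Int × List Int)) :=
  (3, [(0, [1, 2]), (1, [2]), (2, [0])])

def Spec_solve (N : Int) (G : List (Int × List Int)) (out : String) : Prop := out = solve_alt N G
instance (N : Int) (G : List (Int × List Int)) (out : String) : Decidable (Spec_solve N G out) := by
  unfold Spec_solve; infer_instance

-- ===== CLAIM (what is proved, stated in full; the proofs are below) =====
def Claim_equal_solve : Prop :=
  ∀ (N : Int) (G : List (Int × List Int)), Dom_solve N G → Pre_solve N G → Spec_solve N G (solve N G)

-- ===== LEMMAS AND PROOFS =====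

lemma pvDiscardAdd (vis : PySem.Set Int) (n : Int) (h : n ∉ vis) :
    PySem.Set.discard (PySem.Set.add vis n) n = vis := by
  rw [PySem.Set.add_of_not_mem h]
  simp only [PySem.Set.discard, List.filter_append]
  rw [List.filter_eq_self.mpr, List.filter_cons]
  · simp
  · intro a ha
    simp only [Bool.not_eq_eq_eq_not, Bool.not_true, beq_eq_false_iff_ne, ne_eq]
    exact fun he => h (he ▸ ha)

lemma pvPot2_le_of_append (g : PySem.Dict Int (List Int)) (av : PySem.Set Int) (u : List Int) :
    pvPot2 g (av ++ u) ≤ pvPot2 g av := by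
  unfold pvPot2
  apply Finset.card_le_card
  apply Finset.sdiff_subset_sdiff (Finset.Subset.refl _)
  rw [List.toFinset_append]
  exact Finset.subset_union_left

theorem dfs2_av_extend (g : PySem.Dict Int (List Int)) :
    ∀ (f : Nat) (c : Int) (vis : PySem.Set Int) (s : List Int × PySem.Set Int),
      ∃ t, (dfs2 g f c vis s).2 = s.2 ++ t := by
  intro f
  induction f with
  | zero => intro c vis s; exact ⟨[], by rw [dfs2]; simp⟩
  | succ f IH =>
    intro c vis s
    obtain ⟨ans, av⟩ := s
    rw [dfs2]
    split_ifs with h1 h2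
    · exact ⟨[], by simp⟩
    · exact ⟨[], by simp⟩
    · have aux : ∀ (ns : List Int) (t : List Int × PySem.Set Int),
          ∃ u, ((ns.foldl (fun s m => dfs2 g f m (PySem.Set.add vis c) s) t).2 = t.2 ++ u) := by
        intro ns
        induction ns with
        | nil => exact fun t => ⟨[], by simp⟩
        | cons m rest ih =>
          intro t
          obtain ⟨u1, hu1⟩ := IH m (PySem.Set.add vis c) t
          obtain ⟨u2, hu2⟩ := ih (dfs2 g f m (PySem.Set.add vis c) t)
          exact ⟨u1 ++ u2, by
            rw [List.foldl_cons, hu2, hu1, List.append_assoc]⟩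
      obtain ⟨u, hu⟩ := aux (g.getD c []) (PySem.List.pySetD ans c (-1), PySem.Set.add av c)
      by_cases hm : c ∈ av
      · rw [PySem.Set.add_of_mem hm] at hu ⊢
        exact ⟨u, hu⟩
      · rw [PySem.Set.add_of_not_mem hm] at hu ⊢
        exact ⟨[c] ++ u, by rw [hu, List.append_assoc]⟩

theorem sim2 (g : PySem.Dict Int (List Int)) :
    ∀ (f : Nat) (c : Int) (w : List Int) (vis : PySem.Set Int) (ans : List Int)
      (av : PySem.Set Int),
      (∀ x ∈ vis, x ∈ av) → pvPot2 g av < f →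
      run2 g (c :: w) av ans =
        run2 g w (dfs2 g f c vis (ans, av)).2 (dfs2 g f c vis (ans, av)).1 := by
  intro f
  induction f with
  | zero => intro c w vis ans av _ hfuel; exact absurd hfuel (Nat.not_lt_zero _)
  | succ f IH =>
    intro c w vis ans av hsub hfuel
    rw [run2]
    by_cases hv : c ∈ vis
    · rw [if_pos (hsub c hv), dfs2, if_pos hv]
    · by_cases hm : c ∈ av
      · rw [if_pos hm, dfs2, if_neg hv, if_pos hm]
      · rw [if_neg hm, dfs2, if_neg hv, if_neg hm]
        by_cases hk : c ∈ g.keys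
        · have hfuel' : pvPot2 g (PySem.Set.add av c) < f := by
            have := pvPot2_add_lt g av c hk hm
            omega
          have aux : ∀ (ns : List Int) (w' : List Int) (t : List Int × PySem.Set Int),
              (∀ x ∈ PySem.Set.add vis c, x ∈ t.2) → pvPot2 g t.2 < f →
              run2 g (ns ++ w') t.2 t.1 =
                run2 g w' (ns.foldl (fun s m => dfs2 g f m (PySem.Set.add vis c) s) t).2
                          (ns.foldl (fun s m => dfs2 g f m (PySem.Set.add vis c) s) t).1 := by
            intro ns
            induction ns with
            | nil => intro w' t _ _; simp
            | cons m rest ih =>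
              intro w' t hs hf
              obtain ⟨t1, t2⟩ := t
              rw [List.cons_append, List.foldl_cons]
              rw [IH m (rest ++ w') (PySem.Set.add vis c) t1 t2 hs hf]
              obtain ⟨u, hu⟩ := dfs2_av_extend g f m (PySem.Set.add vis c) (t1, t2)
              apply ih
              · intro x hx
                rw [hu]
                exact List.mem_append_left _ (hs x hx)
              · calc pvPot2 g (dfs2 g f m (PySem.Set.add vis c) (t1, t2)).2
                    = pvPot2 g (t2 ++ u) := by rw [hu]
                  _ ≤ pvPot2 g t2 := pvPot2_le_of_append g t2 u
                  _ < f := hf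
          have happ := aux (g.getD c []) w (PySem.List.pySetD ans c (-1), PySem.Set.add av c)
            (fun x hx => by
              rw [PySem.Set.mem_add] at hx ⊢
              exact hx.imp_left (hsub x))
            hfuel'
          exact happ
        · have hc : g.contains c = false := by
            by_contra hb
            exact hk ((PySem.Dict.contains_iff_mem_keys g c).mp (by simpa using hb))
          rw [PySem.Dict.getD_of_not_contains g [] hc]
          simp

theorem roots2 (g : PySem.Dict Int (List Int)) (fuel : Nat) :
    ∀ (can : List Int) (ans : List Int) (av : PySem.Set Int),
      pvPot2 g av < fuel →
      run2 g can av ans = can.foldl (fun s c => dfs2 g fuel c PySem.Set.empty s) (ans, av) := by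
  intro can
  induction can with
  | nil => intro ans av _; rw [run2]; simp
  | cons c rest ih =>
    intro ans av hfuel
    rw [sim2 g fuel c rest PySem.Set.empty ans av (by intro x hx; cases hx) hfuel]
    rw [List.foldl_cons]
    obtain ⟨u, hu⟩ := dfs2_av_extend g fuel c PySem.Set.empty (ans, av)
    have hfuel' : pvPot2 g (dfs2 g fuel c PySem.Set.empty (ans, av)).2 < fuel := by
      calc pvPot2 g (dfs2 g fuel c PySem.Set.empty (ans, av)).2
          = pvPot2 g (av ++ u) := by rw [hu]
        _ ≤ pvPot2 g av := pvPot2_le_of_append g av u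
        _ < fuel := hfuel
    have := ih (dfs2 g fuel c PySem.Set.empty (ans, av)).1
      (dfs2 g fuel c PySem.Set.empty (ans, av)).2 hfuel'
    simpa using this

theorem sim1 (g : PySem.Dict Int (List Int)) :
    ∀ (f : Nat) (n : Int) (k : List PvFrame) (vis : PySem.Set Int)
      (s : List Int × PySem.Set Int × PySem.Dict Int Int),
      pvPot2 g vis < f →
      run1 g (.call n :: k) vis s = run1 g k vis (dfs1 g f n vis s) := by
  intro f
  induction f with
  | zero => intro n k vis s hfuel; exact absurd hfuel (Nat.not_lt_zero _)
  | succ f IH =>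
    intro n k vis s hfuel
    obtain ⟨ans, can, av⟩ := s
    rw [run1]
    by_cases hv : n ∈ vis
    · rw [if_pos hv, dfs1, if_pos hv]
    · by_cases ha : 2 ≤ av.getD n 0
      · rw [if_neg hv, if_pos ha, dfs1, if_neg hv, if_pos ha]
      · rw [if_neg hv, if_neg ha, dfs1, if_neg hv, if_neg ha]
        by_cases hk : n ∈ g.keys
        · have hfuel' : pvPot2 g (PySem.Set.add vis n) < f := by
            have := pvPot2_add_lt g vis n hk hv
            omega
          have aux : ∀ (ns : List Int) (tail : List PvFrame)
              (t : List Int × PySem.Set Int × PySem.Dict Int Int),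
              run1 g (ns.map PvFrame.call ++ tail) (PySem.Set.add vis n) t =
                run1 g tail (PySem.Set.add vis n)
                  (ns.foldl (fun t m => dfs1 g f m (PySem.Set.add vis n) t) t) := by
            intro ns
            induction ns with
            | nil => intro tail t; simp
            | cons m rest ih =>
              intro tail t
              rw [List.map_cons, List.cons_append, List.foldl_cons]
              rw [IH m (rest.map PvFrame.call ++ tail) (PySem.Set.add vis n) t hfuel']
              exact ih tail (dfs1 g f m (PySem.Set.add vis n) t)
          rw [aux]
          rw [run1, pvDiscardAdd vis n hv]
        · have hc : g.contains n = false := by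
            by_contra hb
            exact hk ((PySem.Dict.contains_iff_mem_keys g n).mp (by simpa using hb))
          rw [PySem.Dict.getD_of_not_contains g [] hc]
          simp only [List.map_nil, List.nil_append, List.foldl_nil]
          rw [run1, pvDiscardAdd vis n hv]

-- ===== VERDICT (by name: the statement is the Claim_ definition above) =====
theorem solve_spec : Claim_equal_solve := by
  intro N G _ _
  show solve N G = solve_alt N G
  simp only [solve, solve_alt]
  have hf : pvPot2 (PySem.Dict.mk G) PySem.Set.empty < G.length + 1 := by
    unfold pvPot2
    have h1 : (PySem.Dict.mk G).keys = G.map Prod.fst := rfl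
    have h2 : (G.map Prod.fst).toFinset.card ≤ (G.map Prod.fst).length :=
      List.toFinset_card_le _
    simp only [PySem.Set.empty, List.toFinset_nil, Finset.sdiff_empty, h1]
    rw [List.length_map] at h2
    omega
  rw [sim1 (PySem.Dict.mk G) (G.length + 1) 0 [] PySem.Set.empty _ hf]
  rw [run1]
  rw [roots2 (PySem.Dict.mk G) (G.length + 1) _ _ PySem.Set.empty hf]
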